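-- pv_equiv track=rewrite | github.com/eleven-yun/top-eleven | data/data_loader.py | split_samples_by_season
-- ===== SOURCE A (Python) =====
-- def split_samples_by_season(samples, match_meta_records, season_split):
--     """Split samples by season definitions from config/data_config.json."""
--     season_by_match = {row["match_id"]: row["season"] for row in match_meta_records}
--     split_to_seasons = {name: set(seasons) for name, seasons in season_split.items()}
--
--     split_samples = {name: [] for name in split_to_seasons}
--     for sample in samples:
--         season = season_by_match.get(sample["match_id"])
--         if season is None:
--             continue
--         for split_name, seasons in split_to_seasons.items():
--             if season in seasons:
--                 split_samples[split_name].append(sample)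
--                 break
--     return split_samples
-- ===== SOURCE B (Python) =====
-- def split_samples_by_season(samples, match_meta_records, season_split):
--     """Split samples by season definitions from config/data_config.json."""
--     season_by_match = {row["match_id"]: row["season"] for row in match_meta_records}
--
--     # Inverted index: season -> split name, first split wins (as A's break did).
--     split_of_season = {}
--     for name, seasons in season_split.items():
--         for s in seasons:
--             split_of_season.setdefault(s, name)
--
--     split_samples = {name: [] for name in season_split}
--     for sample in samples:
--         season = season_by_match.get(sample["match_id"])
--         if season is None:
--             continue
--         name = split_of_season.get(season)
--         if name is not None:
--             split_samples[name].append(sample)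
--     return split_samples
-- ===== Notes on version B (the rewrite author's own statement) =====
-- stated objective: alternative
-- what changed: B replaces A's per-sample inner scan over all splits (with a break) by an inverted season-to-split dictionary built once with setdefault (first split wins), so each sample does a single lookup instead of scanning the splits.
import Mathlib
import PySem

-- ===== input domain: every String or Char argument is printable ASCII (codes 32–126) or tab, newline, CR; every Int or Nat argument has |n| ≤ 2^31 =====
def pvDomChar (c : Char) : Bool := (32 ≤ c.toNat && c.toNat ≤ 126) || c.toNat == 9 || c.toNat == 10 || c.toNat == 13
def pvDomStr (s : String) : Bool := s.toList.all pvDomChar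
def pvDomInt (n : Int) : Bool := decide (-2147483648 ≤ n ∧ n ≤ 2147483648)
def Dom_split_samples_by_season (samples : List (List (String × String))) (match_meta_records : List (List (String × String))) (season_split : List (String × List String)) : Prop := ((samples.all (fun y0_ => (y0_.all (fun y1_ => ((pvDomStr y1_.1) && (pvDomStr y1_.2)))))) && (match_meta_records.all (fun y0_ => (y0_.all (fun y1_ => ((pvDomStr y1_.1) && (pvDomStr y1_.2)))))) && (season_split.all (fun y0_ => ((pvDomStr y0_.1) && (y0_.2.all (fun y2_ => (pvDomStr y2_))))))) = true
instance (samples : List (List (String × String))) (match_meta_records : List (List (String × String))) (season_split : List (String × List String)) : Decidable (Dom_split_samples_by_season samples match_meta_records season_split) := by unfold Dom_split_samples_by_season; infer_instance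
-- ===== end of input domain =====

-- B replaces A's per-sample inner scan over the splits by an inverted season→split index built once
-- (first split wins, like A's break); equivalence of the RETURN value is proved on Pre_ (all rows carry
-- their required keys; elsewhere Python A raises KeyError).

-- ===== PORT A =====
-- {row["match_id"]: row["season"] for row in match_meta_records}; row[...] is total here only under Pre_
def pvSeasonByMatch (match_meta_records : List (List (String × String))) : PySem.Dict String String :=
  match_meta_records.foldl
    (fun d row =>
      d.insert ((PySem.Dict.ofList row).getD "match_id" "") ((PySem.Dict.ofList row).getD "season" ""))
    PySem.Dict.empty

-- A's inner 'for split_name, seasons in split_to_seasons.items(): … break'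
def pvInnerA (season : String) (sample : List (String × String)) :
    List (String × PySem.Set String) → PySem.Dict String (List (List (String × String))) →
    PySem.Dict String (List (List (String × String)))
  | [], d => d
  | (name, seasons) :: rest, d =>
    if PySem.Set.contains seasons season then d.modify name [] (· ++ [sample])
    else pvInnerA season sample rest d

def split_samples_by_season (samples : List (List (String × String))) (match_meta_records : List (List (String × String))) (season_split : List (String × List String)) : List (String × List (List (String × String))) :=
  let season_by_match := pvSeasonByMatch match_meta_records
  let split_to_seasons :=
    season_split.foldl (fun d p => d.insert p.1 (PySem.Set.ofList p.2)) PySem.Dict.empty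
  let init :=
    split_to_seasons.items.foldl
      (fun d p => d.insert p.1 ([] : List (List (String × String)))) PySem.Dict.empty
  (samples.foldl
    (fun d sample =>
      match season_by_match.get? ((PySem.Dict.ofList sample).getD "match_id" "") with
      | none => d
      | some season => pvInnerA season sample split_to_seasons.items d)
    init).items

-- ===== PORT B =====
def split_samples_by_season_alt (samples : List (List (String × String))) (match_meta_records : List (List (String × String))) (season_split : List (String × List String)) : List (String × List (List (String × String))) :=
  let season_by_match := pvSeasonByMatch match_meta_records
  let split_items := (PySem.Dict.ofList season_split).items
  -- inverted index season -> split name, setdefault = first split wins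
  let split_of_season :=
    split_items.foldl (fun d p => p.2.foldl (fun d s => d.setdefault s p.1) d) PySem.Dict.empty
  let init :=
    split_items.foldl
      (fun d p => d.insert p.1 ([] : List (List (String × String)))) PySem.Dict.empty
  (samples.foldl
    (fun d sample =>
      match season_by_match.get? ((PySem.Dict.ofList sample).getD "match_id" "") with
      | none => d
      | some season =>
        match split_of_season.get? season with
        | none => d
        | some name => d.modify name [] (· ++ [sample]))
    init).items

-- ===== PRECONDITION & SPEC =====
-- Pre_: every match-meta row has the keys "match_id" and "season" and every sample has "match_id";
-- on other inputs the Python A raises KeyError (returns nothing).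
def Pre_split_samples_by_season (samples : List (List (String × String))) (match_meta_records : List (List (String × String))) (season_split : List (String × List String)) : Prop :=
  (∀ row ∈ match_meta_records, "match_id" ∈ row.map Prod.fst ∧ "season" ∈ row.map Prod.fst) ∧
  (∀ sample ∈ samples, "match_id" ∈ sample.map Prod.fst)
instance (samples : List (List (String × String))) (match_meta_records : List (List (String × String))) (season_split : List (String × List String)) : Decidable (Pre_split_samples_by_season samples match_meta_records season_split) := by unfold Pre_split_samples_by_season; infer_instance

def pvWitness_split_samples_by_season : (List (List (String × String))) × (List (List (String × String))) × (List (String × List String)) :=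
  ([[("match_id", "m1")], [("match_id", "m2")]],
   [[("match_id", "m1"), ("season", "2021")], [("match_id", "m2"), ("season", "2022")]],
   [("train", ["2021"]), ("val", ["2022"])])

def Spec_split_samples_by_season (samples : List (List (String × String))) (match_meta_records : List (List (String × String))) (season_split : List (String × List String)) (out : List (String × List (List (String × String)))) : Prop := out = split_samples_by_season_alt samples match_meta_records season_split
instance (samples : List (List (String × String))) (match_meta_records : List (List (String × String))) (season_split : List (String × List String)) (out : List (String × List (List (String × String)))) : Decidable (Spec_split_samples_by_season samples match_meta_records season_split out) := by unfold Spec_split_samples_by_season; infer_instance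

-- ===== CLAIM (what is proved, stated in full; the proofs are below) =====
def Claim_equal_split_samples_by_season : Prop := ∀ (samples : List (List (String × String))) (match_meta_records : List (List (String × String))) (season_split : List (String × List String)), Dom_split_samples_by_season samples match_meta_records season_split → Pre_split_samples_by_season samples match_meta_records season_split → Spec_split_samples_by_season samples match_meta_records season_split (split_samples_by_season samples match_meta_records season_split)

-- ===== LEMMAS AND PROOFS =====

-- A's split_to_seasons has the same items as B's split_items, with each seasons list read as a set
theorem pv_items_map (l : List (String × List String)) (d : PySem.Dict String (List String))
    (d' : PySem.Dict String (PySem.Set String))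
    (h : d'.items = d.items.map (fun p => (p.1, PySem.Set.ofList p.2))) :
    (l.foldl (fun d p => d.insert p.1 (PySem.Set.ofList p.2)) d').items
      = (l.foldl (fun d p => d.insert p.1 p.2) d).items.map (fun p => (p.1, PySem.Set.ofList p.2)) := by
  induction l generalizing d d' with
  | nil => simpa using h
  | cons p rest ih =>
    simp only [List.foldl_cons]
    apply ih
    have hkeys : d'.contains p.1 = d.contains p.1 := by
      simp [PySem.Dict.contains_eq_decide_mem_keys, PySem.Dict.keys, h, List.map_map]
    by_cases hc : d.contains p.1 = true
    · rw [PySem.Dict.items_insert_of_contains _ _ (by rw [hkeys]; exact hc),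
        PySem.Dict.items_insert_of_contains _ _ hc, h, List.map_map, List.map_map]
      apply List.map_congr_left
      intro q _
      by_cases hq : q.1 = p.1 <;> simp [hq]
    · rw [PySem.Dict.items_insert_of_not_contains _ _ (by rw [hkeys]; simpa using hc),
        PySem.Dict.items_insert_of_not_contains _ _ (by simpa using hc), h, List.map_append]
      rfl

theorem pv_init_eq {α β : Type} (l1 : List (String × α)) (l2 : List (String × β))
    (h : l1.map Prod.fst = l2.map Prod.fst)
    (d : PySem.Dict String (List (List (String × String)))) :
    l1.foldl (fun d p => d.insert p.1 ([] : List (List (String × String)))) d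
      = l2.foldl (fun d p => d.insert p.1 ([] : List (List (String × String)))) d := by
  induction l1 generalizing l2 d with
  | nil => cases l2 <;> simp_all
  | cons p rest ih =>
    cases l2 with
    | nil => simp_all
    | cons q r2 =>
      simp only [List.map_cons, List.cons.injEq] at h
      simp only [List.foldl_cons, h.1]
      exact ih r2 h.2 _

-- A's inner break-loop is 'find the first matching split, then append there'
theorem pv_innerA_eq_find (season : String) (sample : List (String × String))
    (l : List (String × PySem.Set String)) (d : PySem.Dict String (List (List (String × String)))) :
    pvInnerA season sample l d
      = match l.find? (fun p => PySem.Set.contains p.2 season) with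
        | some p => d.modify p.1 [] (· ++ [sample])
        | none => d := by
  induction l with
  | nil => simp [pvInnerA]
  | cons p rest ih =>
    obtain ⟨n, seas⟩ := p
    by_cases hc : season ∈ seas
    · simp [pvInnerA, PySem.Set.contains, hc, List.find?]
    · simp only [pvInnerA, PySem.Set.contains, List.find?]
      simpa [PySem.Set.contains, hc] using ih

theorem pv_get?_setdefault (d : PySem.Dict String String) (k v s : String) :
    (d.setdefault k v).get? s
      = if s = k then some ((d.getD k v)) else d.get? s := by
  by_cases hc : d.contains k = true
  · rw [PySem.Dict.setdefault_of_contains _ _ hc]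
    by_cases hs : s = k
    · subst hs
      rcases h : d.get? s with _ | w
      · rw [PySem.Dict.contains_eq_isSome_get?, h] at hc; simp at hc
      · simp [PySem.Dict.getD_of_get?_eq_some _ _ h]
    · simp [hs]
  · rw [PySem.Dict.setdefault_of_not_contains _ _ (by simpa using hc),
      PySem.Dict.get?_insert,
      PySem.Dict.getD_of_not_contains _ _ (by simpa using hc)]

-- lookup after the inner setdefault loop over one split's seasons
theorem pv_inner_index (seasons : List String) (name : String)
    (d : PySem.Dict String String) (s : String) :
    ((seasons.foldl (fun d x => d.setdefault x name) d).get? s)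
      = match d.get? s with
        | some v => some v
        | none => if seasons.contains s then some name else none := by
  induction seasons generalizing d with
  | nil => rcases h : d.get? s with _ | w <;> simp [h]
  | cons x rest ih =>
    simp only [List.foldl_cons]
    rw [ih, pv_get?_setdefault]
    by_cases hs : s = x
    · subst hs
      rcases h : d.get? s with _ | w
      · simp [PySem.Dict.getD_eq_get?_getD, h]
      · simp [PySem.Dict.getD_eq_get?_getD, h]
    · rw [if_neg hs]
      rcases h : d.get? s with _ | w <;> simp [h, hs]

-- lookup in B's whole inverted index = first split whose seasons contain the season
theorem pv_index_find (l : List (String × List String)) (d : PySem.Dict String String) (s : String) :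
    ((l.foldl (fun d p => p.2.foldl (fun d x => d.setdefault x p.1) d) d).get? s)
      = match d.get? s with
        | some v => some v
        | none => (l.find? (fun p => p.2.contains s)).map Prod.fst := by
  induction l generalizing d with
  | nil => rcases h : d.get? s with _ | w <;> simp [h]
  | cons p rest ih =>
    simp only [List.foldl_cons]
    rw [ih, pv_inner_index]
    rcases h : d.get? s with _ | w
    · by_cases hc : s ∈ p.2
      · simp [List.find?, hc]
      · simp [List.find?, hc]
    · simp [h]

-- ===== VERDICT (by name: the statement is the Claim_ definition above) =====
theorem split_samples_by_season_spec : Claim_equal_split_samples_by_season := by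
  intro samples match_meta_records season_split _ _
  unfold Spec_split_samples_by_season split_samples_by_season split_samples_by_season_alt
  have hofl : PySem.Dict.ofList season_split
      = season_split.foldl (fun d p => d.insert p.1 p.2) PySem.Dict.empty := rfl
  have hitems :
      (season_split.foldl (fun d p => d.insert p.1 (PySem.Set.ofList p.2)) PySem.Dict.empty).items
        = (PySem.Dict.ofList season_split).items.map (fun p => (p.1, PySem.Set.ofList p.2)) := by
    rw [hofl]; exact pv_items_map season_split PySem.Dict.empty PySem.Dict.empty rfl
  have hinit :
      ((season_split.foldl (fun d p => d.insert p.1 (PySem.Set.ofList p.2)) PySem.Dict.empty).items.foldl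
          (fun d p => d.insert p.1 ([] : List (List (String × String)))) PySem.Dict.empty)
        = ((PySem.Dict.ofList season_split).items.foldl
          (fun d p => d.insert p.1 ([] : List (List (String × String)))) PySem.Dict.empty) := by
    apply pv_init_eq
    rw [hitems, List.map_map]; rfl
  simp only [hinit]
  congr 1
  have hstep :
      (fun (d : PySem.Dict String (List (List (String × String)))) sample =>
        match (pvSeasonByMatch match_meta_records).get? ((PySem.Dict.ofList sample).getD "match_id" "") with
        | none => d
        | some season =>
          pvInnerA season sample
            (season_split.foldl (fun (d : PySem.Dict String (PySem.Set String)) (p : String × List String) => d.insert p.1 (PySem.Set.ofList p.2)) PySem.Dict.empty).items d)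
      = (fun (d : PySem.Dict String (List (List (String × String)))) sample =>
        match (pvSeasonByMatch match_meta_records).get? ((PySem.Dict.ofList sample).getD "match_id" "") with
        | none => d
        | some season =>
          match ((PySem.Dict.ofList season_split).items.foldl
              (fun (d : PySem.Dict String String) (p : String × List String) => p.2.foldl (fun d s => d.setdefault s p.1) d) PySem.Dict.empty).get? season with
          | none => d
          | some name => d.modify name [] (· ++ [sample])) := by
    funext d sample
    rcases (pvSeasonByMatch match_meta_records).get? ((PySem.Dict.ofList sample).getD "match_id" "") with _ | season
    · rfl
    · dsimp only
      rw [pv_innerA_eq_find, hitems, List.find?_map, pv_index_find, PySem.Dict.get?_empty]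
      have hpred : ((fun p => PySem.Set.contains p.2 season) ∘ fun (p : String × List String) => (p.1, PySem.Set.ofList p.2))
          = fun p => p.2.contains season := by
        funext p; simp [PySem.Set.contains]
      rw [hpred]
      rcases hf : (PySem.Dict.ofList season_split).items.find? (fun p => p.2.contains season) with _ | q <;> simp only [hf, Option.map_some, Option.map_none]
  rw [hstep]
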